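-- pv_equiv track=rewrite | github.com/Minipark-KOR/Hi-Dunkey | core/shard.py | get_shard_distribution
-- ===== SOURCE A (Python) =====
-- def get_shard(school_code: str) -> str:
--     """학교 코드로 샤드 결정 (odd/even)"""
--     if not school_code:
--         return "odd"
--     try:
--         last_digit = int(school_code[-1])
--         return "even" if last_digit % 2 == 0 else "odd"
--     except (ValueError, TypeError, IndexError):
--         return "odd"
--
-- def get_shard_group(school_code: str) -> str:
--     """학교 코드로 상세 샤드 그룹 결정 (0-3, 4-7, 8-9)"""
--     if not school_code:
--         return "group1"
--     try:
--         last_digit = int(school_code[-1])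
--         if 0 <= last_digit <= 3:
--             return "group1"
--         elif 4 <= last_digit <= 7:
--             return "group2"
--         else:  # 8-9
--             return "group3"
--     except (ValueError, TypeError, IndexError):
--         return "group1"
--
-- def get_shard_distribution(school_codes: list) -> dict:
--     """학교 코드 리스트의 샤드 분포 통계"""
--     distribution = {
--         "odd": 0,
--         "even": 0,
--         "group1": 0,
--         "group2": 0,
--         "group3": 0,
--         "total": len(school_codes)
--     }
--
--     for code in school_codes:
--         distribution[get_shard(code)] += 1
--         distribution[get_shard_group(code)] += 1
--
--     return distribution
-- ===== SOURCE B (Python) =====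
-- def get_shard_distribution(school_codes: list) -> dict:
--     """Frequency table over last-digit keys, then fixed arithmetic aggregation."""
--     freq = {}
--     for code in school_codes:
--         if code and code[-1].isdigit():
--             k = ord(code[-1]) - 48
--         else:
--             k = -1  # empty or non-digit last char: odd / group1
--         freq[k] = freq.get(k, 0) + 1
--     g = freq.get
--     total = len(school_codes)
--     even = g(0, 0) + g(2, 0) + g(4, 0) + g(6, 0) + g(8, 0)
--     return {
--         "odd": total - even,
--         "even": even,
--         "group1": g(-1, 0) + g(0, 0) + g(1, 0) + g(2, 0) + g(3, 0),
--         "group2": g(4, 0) + g(5, 0) + g(6, 0) + g(7, 0),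
--         "group3": g(8, 0) + g(9, 0),
--         "total": total,
--     }
-- ===== Notes on version B (the rewrite author's own statement) =====
-- stated objective: faster
-- what changed: Instead of classifying each code twice (shard and group) and incrementing a six-key dict per element, B makes one pass mapping each code to a small integer key (last digit, or -1 for empty/non-digit) into a frequency table and then derives all six statistics arithmetically from the table in a fixed second pass.
import Mathlib
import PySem

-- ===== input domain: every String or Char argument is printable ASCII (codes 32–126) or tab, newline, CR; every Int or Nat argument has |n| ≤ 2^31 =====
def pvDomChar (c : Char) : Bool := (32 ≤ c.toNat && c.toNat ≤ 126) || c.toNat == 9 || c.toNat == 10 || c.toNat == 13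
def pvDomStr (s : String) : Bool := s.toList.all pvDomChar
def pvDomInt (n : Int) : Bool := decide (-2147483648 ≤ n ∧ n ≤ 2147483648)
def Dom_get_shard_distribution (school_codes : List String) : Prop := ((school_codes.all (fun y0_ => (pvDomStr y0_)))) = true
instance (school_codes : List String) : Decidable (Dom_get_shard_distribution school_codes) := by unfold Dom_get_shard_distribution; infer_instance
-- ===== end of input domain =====

-- B replaces A's per-element double dict increment by a one-pass frequency table over
-- last-digit keys followed by a fixed arithmetic aggregation (objective: faster, measured).

-- ===== PORT A =====
def get_shard (school_code : String) : String :=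
  if school_code = "" then "odd"
  else
    match PySem.Str.pyGet? school_code (-1) with
    | some c =>
        match PySem.Int.ofChars? [c] with
        | some last_digit => if PySem.Int.mod last_digit 2 = 0 then "even" else "odd"
        | none => "odd"          -- except ValueError
    | none => "odd"              -- except IndexError (unreachable: the string is nonempty)

def get_shard_group (school_code : String) : String :=
  if school_code = "" then "group1"
  else
    match PySem.Str.pyGet? school_code (-1) with
    | some c =>
        match PySem.Int.ofChars? [c] with
        | some last_digit =>
            if 0 ≤ last_digit ∧ last_digit ≤ 3 then "group1"
            else if 4 ≤ last_digit ∧ last_digit ≤ 7 then "group2"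
            else "group3"
        | none => "group1"       -- except ValueError
    | none => "group1"           -- except IndexError (unreachable)

def get_shard_distribution (school_codes : List String) : List (String × Int) :=
  let distribution : PySem.Dict String Int :=
    PySem.Dict.ofList [("odd", 0), ("even", 0), ("group1", 0), ("group2", 0),
                       ("group3", 0), ("total", (school_codes.length : Int))]
  (school_codes.foldl
    (fun d code =>
      (d.modify (get_shard code) 0 (· + 1)).modify (get_shard_group code) 0 (· + 1))
    distribution).items

-- ===== PORT B =====
-- key of a code: its last digit, or -1 for empty / non-digit last char
def pvKey (code : String) : Int :=
  match code.toList.getLast? with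
  | some ch => if PySem.Chars.isdigit ch then (ch.toNat : Int) - 48 else -1
  | none => -1

def get_shard_distribution_alt (school_codes : List String) : List (String × Int) :=
  let freq : PySem.Dict Int Int :=
    school_codes.foldl (fun d code => d.insert (pvKey code) (d.getD (pvKey code) 0 + 1))
      PySem.Dict.empty
  let total : Int := school_codes.length
  let even := freq.getD 0 0 + freq.getD 2 0 + freq.getD 4 0 + freq.getD 6 0 + freq.getD 8 0
  [("odd", total - even), ("even", even),
   ("group1", freq.getD (-1) 0 + freq.getD 0 0 + freq.getD 1 0 + freq.getD 2 0 + freq.getD 3 0),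
   ("group2", freq.getD 4 0 + freq.getD 5 0 + freq.getD 6 0 + freq.getD 7 0),
   ("group3", freq.getD 8 0 + freq.getD 9 0),
   ("total", total)]

-- ===== PRECONDITION & SPEC =====
def Spec_get_shard_distribution (school_codes : List String) (out : List (String × Int)) : Prop := out = get_shard_distribution_alt school_codes
instance (school_codes : List String) (out : List (String × Int)) : Decidable (Spec_get_shard_distribution school_codes out) := by unfold Spec_get_shard_distribution; infer_instance

-- ===== CLAIM (what is proved, stated in full; the proofs are below) =====
def Claim_equal_get_shard_distribution : Prop := ∀ (school_codes : List String), Dom_get_shard_distribution school_codes → Spec_get_shard_distribution school_codes (get_shard_distribution school_codes)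

-- ===== LEMMAS AND PROOFS =====

lemma shard_cases (c : String) : get_shard c = "odd" ∨ get_shard c = "even" := by
  unfold get_shard
  split
  · left; rfl
  · split
    · split
      · split <;> simp
      · left; rfl
    · left; rfl

lemma group_cases (c : String) :
    get_shard_group c = "group1" ∨ get_shard_group c = "group2" ∨ get_shard_group c = "group3" := by
  unfold get_shard_group
  split
  · left; rfl
  · split
    · split
      · split
        · left; rfl
        · split <;> simp
      · left; rfl
    · left; rfl

-- single-character int(): checked once over the 128 ASCII codepoints
set_option maxRecDepth 8192 in
lemma shard_inner : ∀ n < 128,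
    (match PySem.Int.ofChars? [Char.ofNat n] with
     | some d => if PySem.Int.mod d 2 = 0 then "even" else "odd"
     | none => "odd")
    = if (if PySem.Chars.isdigit (Char.ofNat n) then ((Char.ofNat n).toNat : Int) - 48 else -1)
          ∈ ([0, 2, 4, 6, 8] : List Int) then "even" else "odd" := by decide

set_option maxRecDepth 8192 in
lemma group_inner : ∀ n < 128,
    (match PySem.Int.ofChars? [Char.ofNat n] with
     | some d =>
         if 0 ≤ d ∧ d ≤ 3 then "group1"
         else if 4 ≤ d ∧ d ≤ 7 then "group2"
         else "group3"
     | none => "group1")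
    = (if (if PySem.Chars.isdigit (Char.ofNat n) then ((Char.ofNat n).toNat : Int) - 48 else -1)
           ∈ ([-1, 0, 1, 2, 3] : List Int) then "group1"
       else if (if PySem.Chars.isdigit (Char.ofNat n) then ((Char.ofNat n).toNat : Int) - 48 else -1)
           ∈ ([4, 5, 6, 7] : List Int) then "group2" else "group3") := by decide

lemma toList_ne_nil {s : String} (h : s ≠ "") : s.toList ≠ [] := by
  intro hn
  exact h (String.toList_eq_nil_iff.mp hn)

lemma pyGet_last {s : String} {ch : Char} (h : s.toList.getLast? = some ch) :
    PySem.List.pyGet? s.toList (-1) = some ch := by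
  have hne : s.toList ≠ [] := by intro hn; simp [hn] at h
  rw [PySem.List.pyGet?_neg_ofNat s.toList 1 (by omega)
        (by have := List.length_pos_iff.mpr hne; omega)]
  rwa [← List.getLast?_eq_getElem?]

lemma domChar_lt {c : Char} (h : pvDomChar c = true) : c.toNat < 128 := by
  simp [pvDomChar] at h; omega

lemma key_of_last {code : String} {ch : Char} (h : code.toList.getLast? = some ch) :
    pvKey code = if PySem.Chars.isdigit ch then (ch.toNat : Int) - 48 else -1 := by
  simp [pvKey, h]

lemma shard_key (code : String) (hdom : pvDomStr code = true) :
    get_shard code = if pvKey code ∈ ([0, 2, 4, 6, 8] : List Int) then "even" else "odd" := by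
  by_cases hc : code = ""
  · subst hc; simp [get_shard, pvKey]
  · have hne := toList_ne_nil hc
    obtain ⟨ch, hch⟩ := Option.isSome_iff_exists.mp (List.getLast?_isSome.mpr hne)
    have hmem : ch ∈ code.toList := List.mem_of_getLast? hch
    have hlt : ch.toNat < 128 := domChar_lt ((List.all_eq_true.mp hdom) ch hmem)
    have h := shard_inner ch.toNat hlt
    rw [Char.ofNat_toNat] at h
    rw [key_of_last hch]
    simpa [get_shard, hc, pyGet_last hch] using h

lemma group_key (code : String) (hdom : pvDomStr code = true) :
    get_shard_group code =
      if pvKey code ∈ ([-1, 0, 1, 2, 3] : List Int) then "group1"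
      else if pvKey code ∈ ([4, 5, 6, 7] : List Int) then "group2" else "group3" := by
  by_cases hc : code = ""
  · subst hc; simp [get_shard_group, pvKey]
  · have hne := toList_ne_nil hc
    obtain ⟨ch, hch⟩ := Option.isSome_iff_exists.mp (List.getLast?_isSome.mpr hne)
    have hmem : ch ∈ code.toList := List.mem_of_getLast? hch
    have hlt : ch.toNat < 128 := domChar_lt ((List.all_eq_true.mp hdom) ch hmem)
    have h := group_inner ch.toNat hlt
    rw [Char.ofNat_toNat] at h
    rw [key_of_last hch]
    simpa [get_shard_group, hc, pyGet_last hch] using h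

-- A's loop: each counter of the fixed dict ends at start value + the two classification counts
lemma A_fold_getD (codes : List String) (d : PySem.Dict String Int) (k : String) :
    (codes.foldl
      (fun d code =>
        (d.modify (get_shard code) 0 (· + 1)).modify (get_shard_group code) 0 (· + 1)) d).getD k 0
    = d.getD k 0 + (codes.countP (fun c => get_shard c == k) : Int)
        + (codes.countP (fun c => get_shard_group c == k) : Int) := by
  induction codes generalizing d with
  | nil => simp
  | cons c cs ih =>
      have hne : get_shard_group c ≠ get_shard c := by
        rcases shard_cases c with h | h <;> rcases group_cases c with g | g | g <;> simp [h, g]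
      rw [List.foldl_cons, ih]
      simp only [PySem.Dict.getD_modify, List.countP_cons, beq_iff_eq]
      rw [if_neg hne]
      split_ifs <;> clear ih <;> (try subst_vars) <;> (try push_cast) <;>
        first
        | omega
        | simp_all

-- A's loop never changes the key list of the fixed dict
lemma A_fold_keys (codes : List String) (d : PySem.Dict String Int)
    (h : d.keys = ["odd", "even", "group1", "group2", "group3", "total"]) :
    (codes.foldl
      (fun d code =>
        (d.modify (get_shard code) 0 (· + 1)).modify (get_shard_group code) 0 (· + 1)) d).keys
    = ["odd", "even", "group1", "group2", "group3", "total"] := by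
  induction codes generalizing d with
  | nil => simpa using h
  | cons c cs ih =>
      rw [List.foldl_cons]
      apply ih
      have hs : (d.modify (get_shard c) 0 (· + 1)).keys = d.keys := by
        rw [PySem.Dict.keys_modify, PySem.Dict.keys_insert_of_contains]
        rw [PySem.Dict.contains_iff_mem_keys, h]
        rcases shard_cases c with hc | hc <;> simp [hc]
      rw [PySem.Dict.keys_modify, PySem.Dict.keys_insert_of_contains, hs, h]
      rw [PySem.Dict.contains_iff_mem_keys, hs, h]
      rcases group_cases c with hc | hc | hc <;> simp [hc]

-- B's frequency table reads off as a count
lemma freq_getD (codes : List String) (k : Int) :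
    (codes.foldl (fun d code => d.insert (pvKey code) (d.getD (pvKey code) 0 + 1))
      PySem.Dict.empty).getD k 0
    = (codes.countP (fun c => pvKey c == k) : Int) := by
  rw [← List.foldl_map (f := pvKey)
        (g := fun (d : PySem.Dict Int Int) x => d.insert x (d.getD x 0 + 1)),
      PySem.Dict.foldl_insert_getD_add_one_eq_counter, PySem.Dict.getD_counter]
  simp [List.count_eq_countP, List.countP_map, Function.comp_def]

lemma countP_mem_cons (l : List String) (k : Int) (ks : List Int) (hk : k ∉ ks) :
    l.countP (fun a => decide (pvKey a ∈ k :: ks))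
    = l.countP (fun a => pvKey a == k) + l.countP (fun a => decide (pvKey a ∈ ks)) := by
  induction l with
  | nil => simp
  | cons a l ih =>
      simp only [List.countP_cons, ih]
      by_cases h : pvKey a = k
      · simp [h, hk]; omega
      · simp [h]; omega

lemma countP_mem_single (l : List String) (k : Int) :
    l.countP (fun a => decide (pvKey a ∈ ([k] : List Int))) = l.countP (fun a => pvKey a == k) :=
  List.countP_congr (by intro x _; simp)

lemma pvKey_range (c : String) : pvKey c = -1 ∨ (0 ≤ pvKey c ∧ pvKey c ≤ 9) := by
  unfold pvKey
  split
  · rename_i ch hch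
    by_cases h : PySem.Chars.isdigit ch = true
    · have := by
        simpa [PySem.Chars.isdigit, Char.le_def, UInt32.le_iff_toNat_le] using h
      right; simp [h]; omega
    · left; simp [h]
  · left; rfl

lemma shard_count_zero (codes : List String) (k : String) (h1 : k ≠ "odd") (h2 : k ≠ "even") :
    codes.countP (fun c => get_shard c == k) = 0 :=
  List.countP_eq_zero.mpr (fun c _ => by
    rcases shard_cases c with h | h <;> simp [h, beq_iff_eq] <;> [exact Ne.symm h1; exact Ne.symm h2])

lemma group_count_zero (codes : List String) (k : String)
    (h1 : k ≠ "group1") (h2 : k ≠ "group2") (h3 : k ≠ "group3") :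
    codes.countP (fun c => get_shard_group c == k) = 0 :=
  List.countP_eq_zero.mpr (fun c _ => by
    rcases group_cases c with h | h | h <;> simp [h, beq_iff_eq] <;>
      [exact Ne.symm h1; exact Ne.symm h2; exact Ne.symm h3])

lemma shard_even_count (codes : List String) (hdall : ∀ c ∈ codes, pvDomStr c = true) :
    codes.countP (fun c => get_shard c == "even")
      = codes.countP (fun a => decide (pvKey a ∈ ([0, 2, 4, 6, 8] : List Int))) :=
  List.countP_congr (by
    intro x hx
    rw [shard_key x (hdall x hx)]
    by_cases h : pvKey x ∈ ([0, 2, 4, 6, 8] : List Int) <;> simp [h])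

lemma shard_odd_count (codes : List String) (hdall : ∀ c ∈ codes, pvDomStr c = true) :
    codes.countP (fun c => get_shard c == "odd")
      + codes.countP (fun a => decide (pvKey a ∈ ([0, 2, 4, 6, 8] : List Int)))
      = codes.length := by
  have h := List.length_eq_countP_add_countP
    (fun a => decide (pvKey a ∈ ([0, 2, 4, 6, 8] : List Int))) (l := codes)
  have hodd : codes.countP (fun c => get_shard c == "odd")
      = codes.countP (fun a => decide ¬(decide (pvKey a ∈ ([0, 2, 4, 6, 8] : List Int)) = true)) :=
    List.countP_congr (by
      intro x hx
      rw [shard_key x (hdall x hx)]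
      by_cases hm : pvKey x ∈ ([0, 2, 4, 6, 8] : List Int) <;> simp [hm])
  omega

lemma group1_count (codes : List String) (hdall : ∀ c ∈ codes, pvDomStr c = true) :
    codes.countP (fun c => get_shard_group c == "group1")
      = codes.countP (fun a => decide (pvKey a ∈ ([-1, 0, 1, 2, 3] : List Int))) :=
  List.countP_congr (by
    intro x hx
    rw [group_key x (hdall x hx)]
    by_cases h1 : pvKey x ∈ ([-1, 0, 1, 2, 3] : List Int)
    · simp [h1]
    · by_cases h2 : pvKey x ∈ ([4, 5, 6, 7] : List Int) <;> simp [h1, h2])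

lemma group2_count (codes : List String) (hdall : ∀ c ∈ codes, pvDomStr c = true) :
    codes.countP (fun c => get_shard_group c == "group2")
      = codes.countP (fun a => decide (pvKey a ∈ ([4, 5, 6, 7] : List Int))) :=
  List.countP_congr (by
    intro x hx
    rw [group_key x (hdall x hx)]
    by_cases h1 : pvKey x ∈ ([-1, 0, 1, 2, 3] : List Int)
    · have : pvKey x ∉ ([4, 5, 6, 7] : List Int) := by simp at h1 ⊢; omega
      simp [h1, this]
    · by_cases h2 : pvKey x ∈ ([4, 5, 6, 7] : List Int) <;> simp [h1, h2])

lemma group3_count (codes : List String) (hdall : ∀ c ∈ codes, pvDomStr c = true) :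
    codes.countP (fun c => get_shard_group c == "group3")
      = codes.countP (fun a => decide (pvKey a ∈ ([8, 9] : List Int))) :=
  List.countP_congr (by
    intro x hx
    rw [group_key x (hdall x hx)]
    have hr := pvKey_range x
    by_cases h3 : pvKey x ∈ ([8, 9] : List Int)
    · have h1 : pvKey x ∉ ([-1, 0, 1, 2, 3] : List Int) := by simp at h3 ⊢; omega
      have h2 : pvKey x ∉ ([4, 5, 6, 7] : List Int) := by simp at h3 ⊢; omega
      simp [h1, h2, h3]
    · have : pvKey x ∈ ([-1, 0, 1, 2, 3] : List Int) ∨ pvKey x ∈ ([4, 5, 6, 7] : List Int) := by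
        simp at h3 ⊢; omega
      rcases this with h | h
      · simp [h, h3]
      · have h1 : pvKey x ∉ ([-1, 0, 1, 2, 3] : List Int) := by simp at h ⊢; omega
        simp [h1, h, h3])

-- ===== VERDICT (by name: the statement is the Claim_ definition above) =====
theorem get_shard_distribution_spec : Claim_equal_get_shard_distribution := by
  intro codes hdom
  have hdall : ∀ c ∈ codes, pvDomStr c = true := List.all_eq_true.mp hdom
  unfold Spec_get_shard_distribution
  simp only [get_shard_distribution, get_shard_distribution_alt]
  have hkeys := A_fold_keys codes
    (PySem.Dict.ofList [("odd", 0), ("even", 0), ("group1", 0), ("group2", 0),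
        ("group3", 0), ("total", (codes.length : Int))])
    (by simp [PySem.Dict.ofList, PySem.Dict.update, PySem.Dict.keys, PySem.Dict.insert,
              PySem.Dict.empty])
  rw [PySem.Dict.items_eq_map_keys _ (by rw [hkeys]; decide) (0 : Int), hkeys]
  simp only [List.map_cons, List.map_nil, A_fold_getD, freq_getD]
  simp only [PySem.Dict.ofList, PySem.Dict.update, List.foldl_cons, List.foldl_nil]
  simp only [PySem.Dict.getD_insert, PySem.Dict.getD_empty]
  norm_num
  have z1 := shard_count_zero codes "group1" (by decide) (by decide)
  have z2 := shard_count_zero codes "group2" (by decide) (by decide)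
  have z3 := shard_count_zero codes "group3" (by decide) (by decide)
  have z4 := shard_count_zero codes "total" (by decide) (by decide)
  have z5 := group_count_zero codes "odd" (by decide) (by decide) (by decide)
  have z6 := group_count_zero codes "even" (by decide) (by decide) (by decide)
  have z7 := group_count_zero codes "total" (by decide) (by decide) (by decide)
  have he := shard_even_count codes hdall
  have ho := shard_odd_count codes hdall
  have hg1 := group1_count codes hdall
  have hg2 := group2_count codes hdall
  have hg3 := group3_count codes hdall
  have s1 : codes.countP (fun a => decide (pvKey a ∈ ([0, 2, 4, 6, 8] : List Int)))
      = codes.countP (fun a => pvKey a == 0) + codes.countP (fun a => pvKey a == 2)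
        + codes.countP (fun a => pvKey a == 4) + codes.countP (fun a => pvKey a == 6)
        + codes.countP (fun a => pvKey a == 8) := by
    rw [countP_mem_cons codes 0 _ (by decide), countP_mem_cons codes 2 _ (by decide),
        countP_mem_cons codes 4 _ (by decide), countP_mem_cons codes 6 _ (by decide),
        countP_mem_single]
    omega
  have s2 : codes.countP (fun a => decide (pvKey a ∈ ([-1, 0, 1, 2, 3] : List Int)))
      = codes.countP (fun a => pvKey a == -1) + codes.countP (fun a => pvKey a == 0)
        + codes.countP (fun a => pvKey a == 1) + codes.countP (fun a => pvKey a == 2)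
        + codes.countP (fun a => pvKey a == 3) := by
    rw [countP_mem_cons codes (-1) _ (by decide), countP_mem_cons codes 0 _ (by decide),
        countP_mem_cons codes 1 _ (by decide), countP_mem_cons codes 2 _ (by decide),
        countP_mem_single]
    omega
  have s3 : codes.countP (fun a => decide (pvKey a ∈ ([4, 5, 6, 7] : List Int)))
      = codes.countP (fun a => pvKey a == 4) + codes.countP (fun a => pvKey a == 5)
        + codes.countP (fun a => pvKey a == 6) + codes.countP (fun a => pvKey a == 7) := by
    rw [countP_mem_cons codes 4 _ (by decide), countP_mem_cons codes 5 _ (by decide),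
        countP_mem_cons codes 6 _ (by decide), countP_mem_single]
    omega
  have s4 : codes.countP (fun a => decide (pvKey a ∈ ([8, 9] : List Int)))
      = codes.countP (fun a => pvKey a == 8) + codes.countP (fun a => pvKey a == 9) := by
    rw [countP_mem_cons codes 8 _ (by decide), countP_mem_single]
  rw [if_neg (by decide : ¬("odd":String) = "total"), if_neg (by decide : ¬("even":String) = "total"),
      if_neg (by decide : ¬("group1":String) = "total"), if_neg (by decide : ¬("group2":String) = "total"),
      if_neg (by decide : ¬("group3":String) = "total")]
  refine ⟨?_, ?_, ?_, ?_, ?_, ?_⟩ <;> omega
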